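-- pv_equiv track=rewrite | github.com/hzwuhao8/ccc | 2017/j4.py | is_seq
-- ===== SOURCE A (Python) =====
-- dic_cache = {}
--
-- def is_seq(my_str):
--     if my_str in dic_cache:
--         return dic_cache[my_str]
--     else:
--         s1 = my_str.replace(':', '')
--         s_seq = [int(x) for x in s1]
--         d1 = s_seq[:-1]
--         d2 = s_seq[1:]
--         d_zip = zip(d1, d2)
--         d3 = [x[0] - x[1] for x in d_zip]
--         d4 = set(d3)
--         dic_cache[my_str] = len(d4) == 1
--         return len(d4) == 1
-- ===== SOURCE B (Python) =====
-- def is_seq(my_str):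
--     # Single pass over the string with an early exit; no difference list, no set.
--     prev = None
--     diff = None
--     for ch in my_str:
--         if ch == ':':
--             continue
--         d = int(ch)
--         if prev is None:
--             prev = d
--             continue
--         if diff is None:
--             diff = d - prev
--         elif d - prev != diff:
--             return False
--         prev = d
--     return diff is not None
-- ===== Notes on version B (the rewrite author's own statement) =====
-- stated objective: simpler
-- what changed: B replaces A's pipeline (strip ':', build two slices, zip them into a difference list, deduplicate into a set, test its size) with a single early-exit scan over the string that stores the first difference and returns False on the first mismatch.
import Mathlib
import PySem

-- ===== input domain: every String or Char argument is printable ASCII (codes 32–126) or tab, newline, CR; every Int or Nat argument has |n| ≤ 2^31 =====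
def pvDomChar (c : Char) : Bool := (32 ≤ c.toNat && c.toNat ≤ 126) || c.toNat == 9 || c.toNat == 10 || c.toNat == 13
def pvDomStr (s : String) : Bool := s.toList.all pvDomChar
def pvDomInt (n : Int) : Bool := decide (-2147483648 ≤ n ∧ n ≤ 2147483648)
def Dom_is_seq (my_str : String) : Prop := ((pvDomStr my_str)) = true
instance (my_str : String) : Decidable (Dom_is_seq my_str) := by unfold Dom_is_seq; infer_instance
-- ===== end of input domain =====

-- B replaces A's difference list + set construction with a single early-exit scan over the
-- string (objective: simpler).  A's dic_cache memoization caches the value it returns and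
-- never changes it, so it is not modelled; the equivalence is about the return value.

-- ===== PORT A =====
def is_seq (my_str : String) : Bool :=
  let s1 := PySem.Str.replace my_str ":" ""
  -- [int(x) for x in s1] ; none = ValueError on a non-digit character, excluded by Pre_
  match s1.toList.mapM (fun c => PySem.Int.ofChars? [c]) with
  | none => false
  | some s_seq =>
    let d1 := PySem.List.slice s_seq none (some (-1))   -- s_seq[:-1]
    let d2 := PySem.List.slice s_seq (some 1) none      -- s_seq[1:]
    let d3 := (d1.zip d2).map (fun x => x.1 - x.2)
    let d4 := PySem.Set.ofList d3
    PySem.Set.len d4 == 1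

-- ===== PORT B =====
-- the for-loop of Source B: state (prev, diff); 'return False' = the false leaves
def isSeqAltGo : Option Int → Option Int → List Char → Bool
  | _, diff, [] => diff.isSome
  | prev, diff, c :: cs =>
    if c == ':' then isSeqAltGo prev diff cs
    else
      match PySem.Int.ofChars? [c] with      -- int(ch); none = ValueError, excluded by Pre_
      | none => false
      | some d =>
        match prev with
        | none => isSeqAltGo (some d) diff cs
        | some p =>
          match diff with
          | none => isSeqAltGo (some d) (some (d - p)) cs
          | some df => if d - p == df then isSeqAltGo (some d) (some df) cs else false

def is_seq_alt (my_str : String) : Bool := isSeqAltGo none none my_str.toList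

-- ===== PRECONDITION & SPEC =====
-- Pre_ excludes exactly the inputs where the Python A raises ValueError: a character that is
-- neither ':' nor a decimal digit makes int(x) raise.  (The Lean ports map that raise to
-- false on both sides, so the equivalence proof below happens to hold for all strings;
-- Pre_ still delimits where the claim speaks for the Python programs.)
def Pre_is_seq (my_str : String) : Prop := (my_str.toList.all (fun c => c == ':' || c.isDigit)) = true
instance (my_str : String) : Decidable (Pre_is_seq my_str) := by unfold Pre_is_seq; infer_instance
def pvWitness_is_seq : String := "2:4:6"
def Spec_is_seq (my_str : String) (out : Bool) : Prop := out = is_seq_alt my_str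
instance (my_str : String) (out : Bool) : Decidable (Spec_is_seq my_str out) := by unfold Spec_is_seq; infer_instance

-- ===== CLAIM (what is proved, stated in full; the proofs are below) =====
def Claim_equal_is_seq : Prop := ∀ (my_str : String), Dom_is_seq my_str → Pre_is_seq my_str → Spec_is_seq my_str (is_seq my_str)

-- ===== LEMMAS AND PROOFS =====

-- B's loop on the integer values, once the characters have been converted
def intLoop : Option Int → Option Int → List Int → Bool
  | _, diff, [] => diff.isSome
  | prev, diff, d :: ds =>
    match prev with
    | none => intLoop (some d) diff ds
    | some p =>
      match diff with
      | none => intLoop (some d) (some (d - p)) ds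
      | some df => if d - p == df then intLoop (some d) (some df) ds else false

-- A's list d3 of consecutive differences
def adiffs (vs : List Int) : List Int := (vs.dropLast.zip (vs.drop 1)).map (fun x => x.1 - x.2)

theorem replace_go_colon (l : List Char) : ∀ (fuel : Nat) (acc : List Char), l.length ≤ fuel →
    PySem.Chars.replace.go [':'] [] fuel l acc = acc.reverse ++ l.filter (fun c => !(c == ':')) := by
  induction l with
  | nil =>
    intro fuel acc _
    rw [PySem.Chars.replace.go.eq_def]
    cases fuel <;> simp [List.filter_nil]
  | cons c t ih =>
    intro fuel acc hle
    cases fuel with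
    | zero => simp at hle
    | succ f =>
      have hm : PySem.Chars.replace.go [':'] [] (f + 1) (c :: t) acc
          = if [':'].isPrefixOf (c :: t) = true then
              PySem.Chars.replace.go [':'] [] f (List.drop [':'].length (c :: t)) ([].reverse ++ acc)
            else PySem.Chars.replace.go [':'] [] f t (c :: acc) := rfl
      rw [hm]
      by_cases hc : c = ':'
      · subst hc
        rw [if_pos (show [':'].isPrefixOf (':' :: t) = true by simp [List.isPrefixOf])]
        show PySem.Chars.replace.go [':'] [] f t acc = _
        rw [ih f acc (by simpa using hle)]
        simp
      · have hpre : ([':'].isPrefixOf (c :: t)) = false := by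
          simp [List.isPrefixOf]
          exact fun h => hc h.symm
        simp only [hpre, Bool.false_eq_true, if_false]
        rw [ih f (c :: acc) (by simpa using hle)]
        have hcb : (c == ':') = false := by simp [hc]
        simp [hcb]

theorem replace_colon (cs : List Char) :
    PySem.Chars.replace cs [':'] [] = cs.filter (fun c => !(c == ':')) := by
  rw [PySem.Chars.replace]
  rw [show ([':'] : List Char).isEmpty = false from rfl]
  simp only [Bool.false_eq_true, if_false]
  exact replace_go_colon cs cs.length [] (le_refl _)

-- Source B's loop ignores ':' characters: it equals the loop on the colon-free list
theorem alt_filter : ∀ (cs : List Char) (prev diff : Option Int),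
    isSeqAltGo prev diff cs = isSeqAltGo prev diff (cs.filter (fun c => !(c == ':'))) := by
  intro cs
  induction cs with
  | nil => intro prev diff; rfl
  | cons c t ih =>
    intro prev diff
    by_cases hc : c = ':'
    · subst hc
      simp [isSeqAltGo, List.filter, ih]
    · have hcb : (c == ':') = false := by simp [hc]
      simp only [List.filter, hcb, Bool.not_false]
      simp only [isSeqAltGo, hcb, Bool.false_eq_true, if_false]
      cases PySem.Int.ofChars? [c] with
      | none => rfl
      | some d =>
        cases prev with
        | none => exact ih _ _
        | some p =>
          cases diff with
          | none => exact ih _ _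
          | some df =>
            by_cases h : (d - p == df) = true <;> simp [h, ih]

-- if some character fails int(), the colon-free loop returns false
theorem alt_of_mapM_none : ∀ (fs : List Char) (prev diff : Option Int),
    (∀ c ∈ fs, c ≠ ':') →
    fs.mapM (fun c => PySem.Int.ofChars? [c]) = none →
    isSeqAltGo prev diff fs = false := by
  intro fs
  induction fs with
  | nil => intro _ _ _ h; simp [List.mapM, List.mapM.loop] at h
  | cons c t ih =>
    intro prev diff hnc h
    have hcb : (c == ':') = false := by simp [hnc c (by simp)]
    simp only [isSeqAltGo, hcb, Bool.false_eq_true, if_false]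
    cases hfc : PySem.Int.ofChars? [c] with
    | none => rfl
    | some d =>
      have ht : t.mapM (fun c => PySem.Int.ofChars? [c]) = none := by
        cases hmt : t.mapM (fun c => PySem.Int.ofChars? [c]) with
        | none => rfl
        | some vs => simp [List.mapM_cons, hfc, hmt] at h
      have ih' := fun prev diff => ih prev diff (fun x hx => hnc x (by simp [hx])) ht
      cases prev with
      | none => exact ih' _ _
      | some p =>
        cases diff with
        | none => exact ih' _ _
        | some df =>
          by_cases hd : (d - p == df) = true <;> simp [hd, ih']

-- if all characters convert, the loop is the loop on the values
theorem alt_of_mapM_some : ∀ (fs : List Char) (vs : List Int) (prev diff : Option Int),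
    fs.mapM (fun c => PySem.Int.ofChars? [c]) = some vs →
    isSeqAltGo prev diff fs = intLoop prev diff vs := by
  intro fs
  induction fs with
  | nil =>
    intro vs prev diff h
    simp [List.mapM, List.mapM.loop] at h
    subst h; rfl
  | cons c t ih =>
    intro vs prev diff h
    rw [List.mapM_cons] at h
    cases hfc : PySem.Int.ofChars? [c] with
    | none => simp [hfc] at h
    | some d =>
      cases hmt : t.mapM (fun c => PySem.Int.ofChars? [c]) with
      | none => simp [hfc, hmt] at h
      | some ws =>
        simp only [hfc, hmt, Option.pure_def] at h
        have hvs : vs = d :: ws := by simpa using h.symm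
        subst hvs
        have hcb : (c == ':') = false := by
          cases hcc : (c == ':') with
          | false => rfl
          | true =>
            have : c = ':' := by simpa using hcc
            subst this
            simp [show PySem.Int.ofChars? [':'] = none from rfl] at hfc
        simp only [isSeqAltGo, hcb, Bool.false_eq_true, if_false, hfc, intLoop]
        cases prev with
        | none => exact ih _ _ _ hmt
        | some p =>
          cases diff with
          | none => exact ih _ _ _ hmt
          | some df =>
            by_cases hd : (d - p == df) = true <;> simp [hd, ih _ _ _ hmt]

-- len(set(x :: l)) == 1  ↔  every element of l equals x
theorem setlen_one (x : Int) (l : List Int) :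
    (PySem.Set.len (PySem.Set.ofList (x :: l)) == 1) = l.all (fun z => z == x) := by
  rw [PySem.Set.ofList_cons]
  rw [Bool.eq_iff_iff]
  constructor
  · intro h
    have hnil : (PySem.Set.ofList l).discard x = [] := by
      have := of_decide_eq_true (by simpa [PySem.Set.len] using h)
      cases hd : (PySem.Set.ofList l).discard x with
      | nil => rfl
      | cons a s => simp [hd] at this
    rw [List.all_eq_true]
    intro z hz
    by_contra hne
    have hzx : z ≠ x := by simpa using hne
    have : z ∈ (PySem.Set.ofList l).discard x :=
      (PySem.Set.mem_discard _ _ _).mpr ⟨(PySem.Set.mem_ofList _ _).mpr hz, hzx⟩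
    simp [hnil] at this
  · intro h
    have hnil : (PySem.Set.ofList l).discard x = [] := by
      rw [List.eq_nil_iff_forall_not_mem]
      intro a ha
      rcases (PySem.Set.mem_discard _ _ _).mp ha with ⟨hm, hne⟩
      have := List.all_eq_true.mp h a ((PySem.Set.mem_ofList _ _).mp hm)
      exact hne (by simpa using this)
    simp [hnil, PySem.Set.len]
  
-- the chain check: all of A's differences equal -df  ↔  B's loop accepts with stored diff df
theorem chain_eq : ∀ (t : List Int) (b df : Int),
    (adiffs (b :: t)).all (fun z => z == -df) = intLoop (some b) (some df) t := by
  intro t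
  induction t with
  | nil => intro b df; rfl
  | cons c t' ih =>
    intro b df
    have hstep : adiffs (b :: c :: t') = (b - c) :: adiffs (c :: t') := by
      simp [adiffs]
    rw [hstep]
    simp only [intLoop]
    by_cases hd : (c - b == df) = true
    · have : (b - c == -df) = true := by
        have := of_decide_eq_true (by simpa using hd)
        simp only [beq_iff_eq]; omega
      simp [this, hd, ih]
    · have hd' : (c - b == df) = false := by simpa using hd
      have : (b - c == -df) = false := by
        rw [beq_eq_false_iff_ne] at hd' ⊢
        intro h; exact hd' (by omega)
      simp [this, hd']

theorem main_int : ∀ (vs : List Int),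
    (PySem.Set.len (PySem.Set.ofList (adiffs vs)) == 1) = intLoop none none vs := by
  intro vs
  match vs with
  | [] => rfl
  | [a] => rfl
  | a :: b :: t =>
    have hstep : adiffs (a :: b :: t) = (a - b) :: adiffs (b :: t) := by simp [adiffs]
    rw [hstep, setlen_one]
    have hab : a - b = -(b - a) := by omega
    rw [hab, chain_eq t b (b - a)]
    rfl

theorem ports_agree (my_str : String) : is_seq my_str = is_seq_alt my_str := by
  have hrep : (PySem.Str.replace my_str ":" "").toList
      = my_str.toList.filter (fun c => !(c == ':')) := by
    rw [PySem.Str.toList_replace]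
    exact replace_colon my_str.toList
  simp only [is_seq, is_seq_alt]
  rw [hrep, alt_filter my_str.toList none none]
  have hnc : ∀ c ∈ my_str.toList.filter (fun c => !(c == ':')), c ≠ ':' := by
    intro c hc
    have := List.of_mem_filter hc
    simpa using this
  cases h : (my_str.toList.filter (fun c => !(c == ':'))).mapM (fun c => PySem.Int.ofChars? [c]) with
  | none =>
    exact (alt_of_mapM_none _ none none hnc h).symm
  | some vs =>
    rw [alt_of_mapM_some _ vs none none h, ← main_int vs]
    show (PySem.Set.len (PySem.Set.ofList
        (((PySem.List.slice vs none (some (-1))).zip (PySem.List.slice vs (some 1) none)).map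
          (fun x => x.1 - x.2))) == 1) = _
    rw [PySem.List.slice_to_neg_one, PySem.List.slice_from_one]
    have ht : vs.tail = vs.drop 1 := (List.drop_one).symm
    rw [ht]
    rfl

-- ===== VERDICT (by name: the statement is the Claim_ definition above) =====
theorem is_seq_spec : Claim_equal_is_seq := by
  intro my_str _ _
  unfold Spec_is_seq
  exact ports_agree my_str
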